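-- pv_equiv track=rewrite | github.com/blkblkaaaa/emailercreater | botemails.py | role_check
-- ===== SOURCE A (Python) =====
-- ROLE_LOCAL_PARTS = {"admin","administrator","postmaster","abuse","support","info","sales","contact","billing","security","webmaster","noreply","no-reply","team","customerservice"}
--
-- def role_check(local_part):
--     lp = local_part.lower()
--     if lp in ROLE_LOCAL_PARTS:
--         return False
--     for r in ROLE_LOCAL_PARTS:
--         if lp.startswith(r):
--             return False
--     return True
-- ===== SOURCE B (Python) =====
-- ROLE_LOCAL_PARTS = {"admin","administrator","postmaster","abuse","support","info","sales","contact","billing","security","webmaster","noreply","no-reply","team","customerservice"}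
--
-- _MAX_ROLE_LEN = max(map(len, ROLE_LOCAL_PARTS))
--
-- def role_check(local_part):
--     lp = local_part.lower()
--     return not any(lp[:i] in ROLE_LOCAL_PARTS
--                    for i in range(1, min(len(lp), _MAX_ROLE_LEN) + 1))
-- ===== Notes on version B (the rewrite author's own statement) =====
-- stated objective: alternative
-- what changed: B drops A's redundant exact-match branch and iterates over the prefixes lp[:i] of the lowercased local part (i up to the longest role-name length), testing each against the role set with one lookup, instead of scanning every role name with startswith.
import Mathlib
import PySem

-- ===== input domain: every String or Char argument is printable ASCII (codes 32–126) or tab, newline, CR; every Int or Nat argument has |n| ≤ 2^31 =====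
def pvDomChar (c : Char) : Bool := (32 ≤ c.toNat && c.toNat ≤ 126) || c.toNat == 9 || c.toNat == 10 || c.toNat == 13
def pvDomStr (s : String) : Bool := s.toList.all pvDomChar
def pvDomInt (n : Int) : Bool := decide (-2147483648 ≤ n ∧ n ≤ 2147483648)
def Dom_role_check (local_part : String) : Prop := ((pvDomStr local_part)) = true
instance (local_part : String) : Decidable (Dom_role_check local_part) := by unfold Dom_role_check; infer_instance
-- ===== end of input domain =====

-- B iterates over the prefixes of the lowercased local part and tests each against the
-- role set, instead of A's exact-match branch plus a startswith scan over every role name.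

-- ===== PORT A =====
def roleList : List String :=
  ["admin","administrator","postmaster","abuse","support","info","sales","contact",
   "billing","security","webmaster","noreply","no-reply","team","customerservice"]

def role_check (local_part : String) : Bool :=
  let lp := PySem.Str.lower local_part
  if roleList.contains lp then false
  else if roleList.any (fun r => PySem.Str.startswith lp r) then false
  else true

-- ===== PORT B =====
def roleMaxLen : Int := (roleList.map (fun r => PySem.Str.len r)).foldl max 0

def role_check_alt (local_part : String) : Bool :=
  let lp := PySem.Str.lower local_part
  !((PySem.List.pyRange 1 (min (PySem.Str.len lp) roleMaxLen + 1) 1).any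
      (fun i => roleList.contains (PySem.Str.slice lp none (some i))))

-- ===== PRECONDITION & SPEC =====
def Spec_role_check (local_part : String) (out : Bool) : Prop := out = role_check_alt local_part
instance (local_part : String) (out : Bool) : Decidable (Spec_role_check local_part out) := by unfold Spec_role_check; infer_instance

-- ===== CLAIM (what is proved, stated in full; the proofs are below) =====
def Claim_equal_role_check : Prop := ∀ (local_part : String), Dom_role_check local_part → Spec_role_check local_part (role_check local_part)

-- ===== LEMMAS AND PROOFS =====

theorem roleList_nonempty : ∀ r ∈ roleList, 1 ≤ r.toList.length := by decide

theorem roleList_short : ∀ r ∈ roleList, (r.toList.length : Int) ≤ roleMaxLen := by decide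

-- the startswith scan over role names finds a hit iff membership of some prefix lp[:i] does
theorem any_startswith_eq_any_prefix (lp : String) :
    roleList.any (fun r => PySem.Str.startswith lp r)
      = (PySem.List.pyRange 1 (min (PySem.Str.len lp) roleMaxLen + 1) 1).any
          (fun i => roleList.contains (PySem.Str.slice lp none (some i))) := by
  rw [Bool.eq_iff_iff]
  simp only [List.any_eq_true, PySem.Str.startswith_eq, PySem.Chars.startswith_iff,
    List.contains_iff_mem, PySem.List.mem_pyRange_one]
  constructor
  · rintro ⟨r, hr, hpre⟩
    have hlen := roleList_nonempty r hr
    have hle : r.toList.length ≤ lp.toList.length := hpre.length_le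
    refine ⟨(r.toList.length : Int), ⟨by exact_mod_cast hlen, ?_⟩, ?_⟩
    · have hm : (r.toList.length : Int) ≤ min (PySem.Str.len lp) roleMaxLen := by
        rw [PySem.Str.len_eq]; exact le_min (by exact_mod_cast hle) (roleList_short r hr)
      omega
    · have hsl : (PySem.Str.slice lp none (some (r.toList.length : Int))).toList
          = lp.toList.take r.toList.length := by
        simp [PySem.List.slice_to_natCast]
      have : (PySem.Str.slice lp none (some (r.toList.length : Int))) = r := by
        apply String.toList_inj.mp
        rw [hsl, ← List.prefix_iff_eq_take.mp hpre]
      rwa [this]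
  · rintro ⟨i, ⟨h1, _⟩, hmem⟩
    refine ⟨_, hmem, ?_⟩
    have hsl : (PySem.Str.slice lp none (some i)).toList = lp.toList.take i.toNat := by
      simp [PySem.List.slice_to _ (by omega : (0:Int) ≤ i)]
    rw [hsl]
    exact List.take_prefix _ _

theorem role_check_spec : Claim_equal_role_check := by
  intro lp _
  unfold Spec_role_check role_check role_check_alt
  simp only
  rw [← any_startswith_eq_any_prefix]
  by_cases hc : roleList.contains (PySem.Str.lower lp) = true
  · have hany : roleList.any (fun r => PySem.Str.startswith (PySem.Str.lower lp) r) = true := by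
      simp only [List.any_eq_true, PySem.Str.startswith_eq, PySem.Chars.startswith_iff]
      exact ⟨_, List.contains_iff_mem.mp hc, List.prefix_refl _⟩
    rw [if_pos hc, hany]; rfl
  · rw [if_neg hc]
    cases roleList.any (fun r => PySem.Str.startswith (PySem.Str.lower lp) r) <;> simp
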